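-- pv_equiv track=rewrite | github.com/Vskesha/learning-modules | leetcode_solutions/maximize_score_after_N_operations.py | max_score2
-- ===== SOURCE A (Python) =====
-- import math
--
-- def max_score2(nums): # recursive solution
--
--     def backtrack(state, pairs_picked) -> int:
--
--         if pairs_picked == max_pairs:
--             return 0
--
--         if memo[state] != -1:
--             return memo[state]
--
--         max_score = 0
--         for i in range(n-1):
--             if (state >> i) & 1:
--                 continue
--             for j in range(i+1, n):
--                 if (state >> j) & 1:
--                     continue
--                 new_state = state | (1 << i) | (1 << j)
--                 curr_score = (pairs_picked + 1) * math.gcd(nums[i], nums[j])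
--                 rem_score = backtrack(new_state, pairs_picked + 1)
--                 max_score = max(max_score, curr_score + rem_score)
--         memo[state] = max_score
--         return max_score
--
--     n = len(nums)
--     max_pairs = n // 2
--     memo = [-1] * (2 ** n)
--     return backtrack(0, 0)
-- ===== SOURCE B (Python) =====
-- import math
--
-- def max_score2(nums):  # bottom-up bitmask tabulation
--     n = len(nums)
--     size = 1 << n
--     dp = [0] * size
--     for state in range(size - 1, -1, -1):
--         pairs_picked = bin(state).count('1') // 2
--         best = dp[state]
--         for i in range(n):
--             if (state >> i) & 1:
--                 continue
--             for j in range(i + 1, n):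
--                 if (state >> j) & 1:
--                     continue
--                 s2 = state | (1 << i) | (1 << j)
--                 best = max(best, (pairs_picked + 1) * math.gcd(nums[i], nums[j]) + dp[s2])
--         dp[state] = best
--     return dp[0]
-- ===== Notes on version B (the rewrite author's own statement) =====
-- stated objective: alternative
-- what changed: Replaced the top-down memoized recursion (backtrack with a memo table and a threaded pairs_picked counter) by an explicit bottom-up tabulation: one reverse scan over all 2^n bitmasks, deriving pairs_picked from the mask's popcount.
import Mathlib
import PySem

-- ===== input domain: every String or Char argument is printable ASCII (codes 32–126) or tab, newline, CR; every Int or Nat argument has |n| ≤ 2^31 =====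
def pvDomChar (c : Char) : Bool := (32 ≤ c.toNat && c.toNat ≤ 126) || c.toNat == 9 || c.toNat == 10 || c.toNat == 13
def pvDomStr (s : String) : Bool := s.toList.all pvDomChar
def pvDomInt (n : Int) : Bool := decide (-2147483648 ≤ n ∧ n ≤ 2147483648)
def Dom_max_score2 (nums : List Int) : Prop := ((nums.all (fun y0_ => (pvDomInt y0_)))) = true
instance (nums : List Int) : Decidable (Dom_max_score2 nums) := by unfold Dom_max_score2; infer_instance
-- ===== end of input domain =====

-- B replaces A's top-down memoized recursion by a bottom-up tabulation over all bitmasks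
-- (reverse scan of the state space, pairs_picked derived from the mask's popcount); objective: alternative.

-- ===== PORT A =====
-- A's memo list ([-1] * 2**n, indexed only by states < 2**n) is encoded as a total function Nat → Int;
-- reads/writes are exactly Python's list reads/writes (always in range). nums[i]/nums[j] (always in range,
-- i,j < len(nums)) are List.getD; math.gcd is Int.gcd (nonnegative gcd of absolute values, Python-exact).
-- The recursion carries an explicit fuel (max_pairs + 1 bounds the depth): a totality guard only.

def pvStepJ (nums : List Int) (state pp i : Nat)
    (rec : Nat → Nat → (Nat → Int) → Int × (Nat → Int))
    (acc2 : Int × (Nat → Int)) (j : Nat) : Int × (Nat → Int) :=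
  if state >>> j &&& 1 = 1 then acc2
  else
    let new_state := state ||| 1 <<< i ||| 1 <<< j
    let curr_score := ((pp : Int) + 1) * (Int.gcd (nums.getD i 0) (nums.getD j 0) : Int)
    let r := rec new_state (pp + 1) acc2.2
    (max acc2.1 (curr_score + r.1), r.2)

def pvStepI (nums : List Int) (n state pp : Nat)
    (rec : Nat → Nat → (Nat → Int) → Int × (Nat → Int))
    (acc : Int × (Nat → Int)) (i : Nat) : Int × (Nat → Int) :=
  if state >>> i &&& 1 = 1 then acc
  else (List.range' (i + 1) (n - (i + 1))).foldl (pvStepJ nums state pp i rec) acc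

def pvBacktrack (nums : List Int) (n T : Nat) : Nat → Nat → Nat → (Nat → Int) → Int × (Nat → Int)
  | 0, _, _, memo => (0, memo)   -- fuel exhausted: unreachable from the top-level call
  | fuel + 1, state, pp, memo =>
    if pp = T then (0, memo)
    else if memo state ≠ -1 then (memo state, memo)
    else
      let r := (List.range (n - 1)).foldl (pvStepI nums n state pp (pvBacktrack nums n T fuel)) (0, memo)
      (r.1, fun s => if s = state then r.1 else r.2 s)

def max_score2 (nums : List Int) : Int :=
  let n := nums.length
  let max_pairs := n / 2
  (pvBacktrack nums n max_pairs (max_pairs + 1) 0 0 (fun _ => -1)).1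

-- ===== PORT B =====
-- bottom-up tabulation: dp = [0]*2**n as a function, states scanned from 2**n-1 down to 0,
-- pairs_picked = bin(state).count('1') // 2 is PySem.Int.bitCount state / 2.

def pvAltStepJ (nums : List Int) (state pp : Nat) (dp : Nat → Int) (i : Nat)
    (best : Int) (j : Nat) : Int :=
  if state >>> j &&& 1 = 1 then best
  else max best (((pp : Int) + 1) * (Int.gcd (nums.getD i 0) (nums.getD j 0) : Int)
                  + dp (state ||| 1 <<< i ||| 1 <<< j))

def pvAltStepI (nums : List Int) (n state pp : Nat) (dp : Nat → Int)
    (best : Int) (i : Nat) : Int :=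
  if state >>> i &&& 1 = 1 then best
  else (List.range' (i + 1) (n - (i + 1))).foldl (pvAltStepJ nums state pp dp i) best

def pvAltProcess (nums : List Int) (n : Nat) (dp : Nat → Int) (state : Nat) : Nat → Int :=
  let pp := PySem.Int.bitCount (state : Int) / 2
  let best := (List.range n).foldl (pvAltStepI nums n state pp dp) (dp state)
  fun s => if s = state then best else dp s

def max_score2_alt (nums : List Int) : Int :=
  let n := nums.length
  let size := 1 <<< n
  (((List.range size).reverse).foldl (pvAltProcess nums n) (fun _ => 0)) 0

-- ===== PRECONDITION & SPEC =====
def Spec_max_score2 (nums : List Int) (out : Int) : Prop := out = max_score2_alt nums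
instance (nums : List Int) (out : Int) : Decidable (Spec_max_score2 nums out) := by unfold Spec_max_score2; infer_instance

-- ===== CLAIM (what is proved, stated in full; the proofs are below) =====
def Claim_equal_max_score2 : Prop := ∀ (nums : List Int), Dom_max_score2 nums → Spec_max_score2 nums (max_score2 nums)

-- ===== LEMMAS AND PROOFS =====

-- popcount on Nat, the proof-side mirror of bin(state).count('1')
def pvPc (s : Nat) : Nat :=
  if h : s = 0 then 0 else s % 2 + pvPc (s / 2)
termination_by s
decreasing_by exact Nat.div_lt_self (Nat.pos_of_ne_zero h) one_lt_two

lemma pvPc_zero : pvPc 0 = 0 := by simp [pvPc]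

lemma pvPc_rec (s : Nat) : pvPc s = s % 2 + pvPc (s / 2) := by
  by_cases h : s = 0
  · subst h; simp [pvPc]
  · rw [pvPc]; simp [h]

lemma bitCount_eq_pvPc (s : Nat) : PySem.Int.bitCount (s : Int) = pvPc s := by
  induction s using Nat.strong_induction_on with
  | _ s ih =>
    by_cases h : s = 0
    · subst h; simp [PySem.Int.bitCount_zero, pvPc]
    · rw [PySem.Int.bitCount_natCast (Nat.pos_of_ne_zero h), pvPc_rec,
        ih (s / 2) (Nat.div_lt_self (Nat.pos_of_ne_zero h) one_lt_two)]

lemma guard_iff (s i : Nat) : (s >>> i &&& 1 = 1) ↔ s.testBit i = true := by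
  simp [Nat.testBit, Nat.and_comm]

lemma mod2_testBit (x : Nat) : x % 2 = (x.testBit 0).toNat := by
  rw [Nat.testBit_zero]
  rcases Nat.mod_two_eq_zero_or_one x with h | h <;> simp [h]

lemma or_mod_two (a b : Nat) : (a ||| b) % 2 = ((a.testBit 0 || b.testBit 0)).toNat := by
  rw [mod2_testBit, Nat.testBit_lor]

lemma or_div_two (a b : Nat) : (a ||| b) / 2 = a / 2 ||| b / 2 := by
  rw [← Nat.shiftRight_one, Nat.shiftRight_or_distrib, Nat.shiftRight_one, Nat.shiftRight_one]

lemma pvPc_or_two_pow (i : Nat) : ∀ s : Nat, s.testBit i = false → pvPc (s ||| 2 ^ i) = pvPc s + 1 := by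
  induction i with
  | zero =>
    intro s h
    rw [pvPc_rec (s ||| 2 ^ 0), pvPc_rec s, or_mod_two, or_div_two]
    rw [Nat.testBit_zero] at h
    have h2 : s % 2 = 0 := by simpa using h
    simp [Nat.testBit_zero, h2]
    omega
  | succ i ih =>
    intro s h
    rw [pvPc_rec (s ||| 2 ^ (i+1)), pvPc_rec s, or_mod_two, or_div_two]
    have hbit : (2 ^ (i+1)).testBit 0 = false := Nat.testBit_two_pow_of_ne (by omega)
    have hdiv : 2 ^ (i+1) / 2 = 2 ^ i := by
      rw [pow_succ, Nat.mul_div_cancel _ (by norm_num : (0:Nat) < 2)]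
    have hb2 : (s / 2).testBit i = false := by
      rw [← Nat.testBit_succ]; exact h
    rw [hdiv, ih (s / 2) hb2, mod2_testBit s, hbit]
    simp
    omega

lemma pvPc_set_two (s i j : Nat) (hi : s.testBit i = false) (hj : s.testBit j = false)
    (hij : i ≠ j) : pvPc (s ||| 1 <<< i ||| 1 <<< j) = pvPc s + 2 := by
  have e1 : (1 : Nat) <<< i = 2 ^ i := by simp [Nat.shiftLeft_eq]
  have e2 : (1 : Nat) <<< j = 2 ^ j := by simp [Nat.shiftLeft_eq]
  rw [e1, e2]
  have hb : (s ||| 2 ^ i).testBit j = false := by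
    rw [Nat.testBit_lor, hj, Nat.testBit_two_pow_of_ne hij]
    rfl
  rw [pvPc_or_two_pow j _ hb, pvPc_or_two_pow i s hi]

lemma pvPc_le (n : Nat) : ∀ s : Nat, s < 2 ^ n → pvPc s ≤ n := by
  induction n with
  | zero => intro s h; interval_cases s; simp [pvPc]
  | succ n ih =>
    intro s h
    rw [pvPc_rec]
    have := ih (s / 2) (by omega)
    omega

lemma lt_new (s i j : Nat) (hi : s.testBit i = false) : s < s ||| 1 <<< i ||| 1 <<< j := by
  have hle : s ≤ s ||| 1 <<< i ||| 1 <<< j := le_trans Nat.left_le_or Nat.left_le_or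
  rcases Nat.lt_or_ge s (s ||| 1 <<< i ||| 1 <<< j) with h | h
  · exact h
  · exfalso
    have heq : s = s ||| 1 <<< i ||| 1 <<< j := le_antisymm hle h
    have : (s ||| 1 <<< i ||| 1 <<< j).testBit i = true := by
      simp [Nat.shiftLeft_eq, Nat.testBit_two_pow_self]
    rw [← heq, hi] at this
    exact Bool.false_ne_true this

lemma new_lt_two_pow (s i j n : Nat) (hs : s < 2 ^ n) (hi : i < n) (hj : j < n) :
    s ||| 1 <<< i ||| 1 <<< j < 2 ^ n := by
  have e1 : (1 : Nat) <<< i = 2 ^ i := by simp [Nat.shiftLeft_eq]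
  have e2 : (1 : Nat) <<< j = 2 ^ j := by simp [Nat.shiftLeft_eq]
  rw [e1, e2]
  exact Nat.or_lt_two_pow (Nat.or_lt_two_pow hs (Nat.pow_lt_pow_right (by norm_num) hi))
    (Nat.pow_lt_pow_right (by norm_num) hj)

-- the pure (memoless) loop body and value function
def pvPairLoop (nums : List Int) (n pp state : Nat) (rec : Nat → Int) (il : List Nat) (b : Int) : Int :=
  il.foldl (pvAltStepI nums n state pp rec) b

def pvG (nums : List Int) (n T : Nat) : Nat → Nat → Nat → Int
  | 0, _, _ => 0
  | fuel + 1, state, pp =>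
    if pp = T then 0
    else pvPairLoop nums n pp state (fun s' => pvG nums n T fuel s' (pp + 1)) (List.range (n - 1)) 0

def pvFv (nums : List Int) (n T s : Nat) : Int :=
  pvG nums n T (T + 1 - pvPc s / 2) s (pvPc s / 2)

def pvInv (nums : List Int) (n T : Nat) (memo : Nat → Int) : Prop :=
  ∀ s, memo s = -1 ∨ memo s = pvFv nums n T s

def pvQ (nums : List Int) (n T : Nat) (dp : Nat → Int) (k : Nat) : Prop :=
  (∀ s, k ≤ s → s < 2 ^ n → pvPc s % 2 = 0 → dp s = pvFv nums n T s) ∧ (∀ s, s < k → dp s = 0)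

lemma tb_false_of_not_guard (s i : Nat) (h : ¬(s >>> i &&& 1 = 1)) : s.testBit i = false := by
  cases hb : s.testBit i
  · rfl
  · exact absurd ((guard_iff s i).mpr hb) h

lemma mem_range'_facts {i n j : Nat} (h : j ∈ List.range' (i + 1) (n - (i + 1))) :
    i < j ∧ j < n := by
  rw [List.mem_range'] at h
  omega

lemma stepJ_congr (nums : List Int) (state pp i : Nat) (r1 r2 : Nat → Int) :
    ∀ (jl : List Nat) (b : Int),
      (∀ j ∈ jl, state.testBit j = false →
        r1 (state ||| 1 <<< i ||| 1 <<< j) = r2 (state ||| 1 <<< i ||| 1 <<< j)) →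
      jl.foldl (pvAltStepJ nums state pp r1 i) b = jl.foldl (pvAltStepJ nums state pp r2 i) b := by
  intro jl
  induction jl with
  | nil => intro b _; rfl
  | cons j tl ih =>
    intro b h
    simp only [List.foldl_cons]
    by_cases hg : state >>> j &&& 1 = 1
    · simp only [pvAltStepJ, if_pos hg]
      exact ih b (fun j' hj' => h j' (List.mem_cons_of_mem _ hj'))
    · have hj : state.testBit j = false := tb_false_of_not_guard _ _ hg
      simp only [pvAltStepJ, if_neg hg]
      rw [h j List.mem_cons_self hj]
      exact ih _ (fun j' hj' => h j' (List.mem_cons_of_mem _ hj'))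

lemma pairLoop_congr (nums : List Int) (n pp state : Nat) (r1 r2 : Nat → Int) :
    ∀ (il : List Nat) (b : Int),
      (∀ i j, i ∈ il → i < j → j < n → state.testBit i = false → state.testBit j = false →
        r1 (state ||| 1 <<< i ||| 1 <<< j) = r2 (state ||| 1 <<< i ||| 1 <<< j)) →
      pvPairLoop nums n pp state r1 il b = pvPairLoop nums n pp state r2 il b := by
  intro il
  induction il with
  | nil => intro b _; rfl
  | cons i tl ih =>
    intro b h
    simp only [pvPairLoop, List.foldl_cons]
    by_cases hg : state >>> i &&& 1 = 1
    · simp only [pvAltStepI, if_pos hg]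
      exact ih b (fun i' j hi' => h i' j (List.mem_cons_of_mem _ hi'))
    · have hi : state.testBit i = false := tb_false_of_not_guard _ _ hg
      simp only [pvAltStepI, if_neg hg]
      rw [stepJ_congr nums state pp i r1 r2 _ b
        (fun j hj hjb => h i j List.mem_cons_self (mem_range'_facts hj).1 (mem_range'_facts hj).2 hi hjb)]
      exact ih _ (fun i' j hi' => h i' j (List.mem_cons_of_mem _ hi'))

lemma stepJ_nop (nums : List Int) (state pp i : Nat) (rec : Nat → Int) :
    ∀ (jl : List Nat) (b : Int), (∀ j ∈ jl, state.testBit j = true) →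
      jl.foldl (pvAltStepJ nums state pp rec i) b = b := by
  intro jl
  induction jl with
  | nil => intro b _; rfl
  | cons j tl ih =>
    intro b h
    simp only [List.foldl_cons, pvAltStepJ, if_pos ((guard_iff state j).mpr (h j List.mem_cons_self))]
    exact ih b (fun j' hj' => h j' (List.mem_cons_of_mem _ hj'))

lemma pairLoop_nop (nums : List Int) (n pp state : Nat) (rec : Nat → Int) :
    ∀ (il : List Nat) (b : Int),
      (∀ i j, i ∈ il → i < j → j < n → ¬(state.testBit i = false ∧ state.testBit j = false)) →
      pvPairLoop nums n pp state rec il b = b := by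
  intro il
  induction il with
  | nil => intro b _; rfl
  | cons i tl ih =>
    intro b h
    simp only [pvPairLoop, List.foldl_cons]
    by_cases hg : state >>> i &&& 1 = 1
    · simp only [pvAltStepI, if_pos hg]
      exact ih b (fun i' j hi' => h i' j (List.mem_cons_of_mem _ hi'))
    · have hi : state.testBit i = false := tb_false_of_not_guard _ _ hg
      simp only [pvAltStepI, if_neg hg]
      rw [stepJ_nop nums state pp i rec _ b (fun j hj => by
        rcases mem_range'_facts hj with ⟨h1, h2⟩
        cases hb : state.testBit j
        · exact absurd ⟨hi, hb⟩ (h i j List.mem_cons_self h1 h2)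
        · rfl)]
      exact ih b (fun i' j hi' => h i' j (List.mem_cons_of_mem _ hi'))

lemma pairLoop_range_drop (nums : List Int) (n pp state : Nat) (rec : Nat → Int) (b : Int) :
    pvPairLoop nums n pp state rec (List.range n) b = pvPairLoop nums n pp state rec (List.range (n - 1)) b := by
  cases n with
  | zero => rfl
  | succ m =>
    simp only [List.range_succ, pvPairLoop, List.foldl_append, List.foldl_cons, List.foldl_nil,
      Nat.add_sub_cancel]
    have : ∀ b' : Int, pvAltStepI nums (m + 1) state pp rec b' m = b' := by
      intro b'
      by_cases hg : state >>> m &&& 1 = 1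
      · simp [pvAltStepI, hg]
      · simp only [pvAltStepI, if_neg hg, Nat.sub_self, List.range'_zero, List.foldl_nil]
    rw [this]

lemma G_congr (nums : List Int) (n T : Nat) :
    ∀ f g s pp, pp ≤ T → T - pp < f → T - pp < g →
      pvG nums n T f s pp = pvG nums n T g s pp := by
  intro f
  induction f with
  | zero => intro g s pp _ h2 _; omega
  | succ f ih =>
    intro g s pp h1 h2 h3
    cases g with
    | zero => omega
    | succ g =>
      by_cases hpT : pp = T
      · simp [pvG, hpT]
      · simp only [pvG, if_neg hpT]
        have hfun : (fun s' => pvG nums n T f s' (pp + 1)) = fun s' => pvG nums n T g s' (pp + 1) := by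
          funext s'
          exact ih g s' (pp + 1) (by omega) (by omega) (by omega)
        rw [hfun]

lemma foldJ_A (nums : List Int) (n T fuel state pp i : Nat)
    (hrec : ∀ s' m, pvInv nums n T m → pvPc s' = 2 * (pp + 1) →
      (pvBacktrack nums n T fuel s' (pp + 1) m).1 = pvG nums n T fuel s' (pp + 1) ∧
      pvInv nums n T ((pvBacktrack nums n T fuel s' (pp + 1) m).2))
    (hi : state.testBit i = false) (hpc : pvPc state = 2 * pp) :
    ∀ (jl : List Nat), (∀ j ∈ jl, i < j) → ∀ (b : Int) (memo : Nat → Int), pvInv nums n T memo →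
      (jl.foldl (pvStepJ nums state pp i (pvBacktrack nums n T fuel)) (b, memo)).1
        = jl.foldl (pvAltStepJ nums state pp (fun s' => pvG nums n T fuel s' (pp + 1)) i) b
      ∧ pvInv nums n T ((jl.foldl (pvStepJ nums state pp i (pvBacktrack nums n T fuel)) (b, memo)).2) := by
  intro jl
  induction jl with
  | nil => intro _ b memo hm; exact ⟨rfl, hm⟩
  | cons j tl ih =>
    intro hmem b memo hm
    simp only [List.foldl_cons]
    by_cases hg : state >>> j &&& 1 = 1
    · simp only [pvStepJ, pvAltStepJ, if_pos hg]
      exact ih (fun j' hj' => hmem j' (List.mem_cons_of_mem _ hj')) b memo hm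
    · have hj : state.testBit j = false := tb_false_of_not_guard _ _ hg
      have hij : i ≠ j := Nat.ne_of_lt (hmem j List.mem_cons_self)
      have hpc' : pvPc (state ||| 1 <<< i ||| 1 <<< j) = 2 * (pp + 1) := by
        rw [pvPc_set_two state i j hi hj hij]; omega
      obtain ⟨he, hinv⟩ := hrec (state ||| 1 <<< i ||| 1 <<< j) memo hm hpc'
      simp only [pvStepJ, pvAltStepJ, if_neg hg]
      rw [he]
      exact ih (fun j' hj' => hmem j' (List.mem_cons_of_mem _ hj')) _ _ hinv

lemma foldI_A (nums : List Int) (n T fuel state pp : Nat)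
    (hrec : ∀ s' m, pvInv nums n T m → pvPc s' = 2 * (pp + 1) →
      (pvBacktrack nums n T fuel s' (pp + 1) m).1 = pvG nums n T fuel s' (pp + 1) ∧
      pvInv nums n T ((pvBacktrack nums n T fuel s' (pp + 1) m).2))
    (hpc : pvPc state = 2 * pp) :
    ∀ (il : List Nat) (b : Int) (memo : Nat → Int), pvInv nums n T memo →
      (il.foldl (pvStepI nums n state pp (pvBacktrack nums n T fuel)) (b, memo)).1
        = pvPairLoop nums n pp state (fun s' => pvG nums n T fuel s' (pp + 1)) il b
      ∧ pvInv nums n T ((il.foldl (pvStepI nums n state pp (pvBacktrack nums n T fuel)) (b, memo)).2) := by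
  intro il
  induction il with
  | nil => intro b memo hm; exact ⟨rfl, hm⟩
  | cons i tl ih =>
    intro b memo hm
    simp only [List.foldl_cons, pvPairLoop]
    by_cases hg : state >>> i &&& 1 = 1
    · simp only [pvStepI, pvAltStepI, if_pos hg]
      exact ih b memo hm
    · have hi : state.testBit i = false := tb_false_of_not_guard _ _ hg
      simp only [pvStepI, pvAltStepI, if_neg hg]
      obtain ⟨he, hinv⟩ := foldJ_A nums n T fuel state pp i hrec hi hpc
        (List.range' (i + 1) (n - (i + 1))) (fun j hj => (mem_range'_facts hj).1) b memo hm
      rcases hfold : List.foldl (pvStepJ nums state pp i (pvBacktrack nums n T fuel)) (b, memo)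
        (List.range' (i + 1) (n - (i + 1))) with ⟨v, m2⟩
      rw [hfold] at he hinv
      simp only at he hinv
      subst he
      simpa [pvPairLoop] using ih _ m2 hinv

lemma bt_correct (nums : List Int) (n T : Nat) :
    ∀ fuel state pp memo, pp ≤ T → T - pp < fuel → pvPc state = 2 * pp → pvInv nums n T memo →
      (pvBacktrack nums n T fuel state pp memo).1 = pvG nums n T fuel state pp ∧
      pvInv nums n T ((pvBacktrack nums n T fuel state pp memo).2) := by
  intro fuel
  induction fuel with
  | zero => intro state pp memo _ h2 _ _; omega
  | succ fuel ih =>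
    intro state pp memo h1 h2 hpc hm
    simp only [pvBacktrack]
    by_cases hpT : pp = T
    · rw [if_pos hpT]
      exact ⟨by simp [pvG, hpT], hm⟩
    · rw [if_neg hpT]
      have hdiv : pvPc state / 2 = pp := by omega
      by_cases hms : memo state ≠ -1
      · rw [if_pos hms]
        refine ⟨?_, hm⟩
        rcases hm state with h | h
        · exact absurd h hms
        · rw [h]
          show pvFv nums n T state = pvG nums n T (fuel + 1) state pp
          unfold pvFv
          rw [hdiv]
          exact G_congr nums n T (T + 1 - pp) (fuel + 1) state pp h1 (by omega) (by omega)
      · rw [if_neg hms]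
        have hrec : ∀ s' m, pvInv nums n T m → pvPc s' = 2 * (pp + 1) →
            (pvBacktrack nums n T fuel s' (pp + 1) m).1 = pvG nums n T fuel s' (pp + 1) ∧
            pvInv nums n T ((pvBacktrack nums n T fuel s' (pp + 1) m).2) := by
          intro s' m hm' hpc'
          exact ih s' (pp + 1) m (by omega) (by omega) hpc' hm'
        obtain ⟨he, hinv⟩ := foldI_A nums n T fuel state pp hrec hpc (List.range (n - 1)) 0 memo hm
        have hG : pvG nums n T (fuel + 1) state pp
            = pvPairLoop nums n pp state (fun s' => pvG nums n T fuel s' (pp + 1)) (List.range (n - 1)) 0 := by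
          simp [pvG, hpT]
        constructor
        · simpa [hG] using he
        · intro s
          by_cases hs : s = state
          · subst hs
            right
            show (if s = s then _ else _) = _
            rw [if_pos rfl, he, ← hG]
            show pvG nums n T (fuel + 1) s pp = pvFv nums n T s
            unfold pvFv
            rw [hdiv]
            exact G_congr nums n T (fuel + 1) (T + 1 - pp) s pp h1 (by omega) (by omega)
          · simp only [if_neg hs]
            exact hinv s

lemma stepB (nums : List Int) (n T k : Nat) (hT : T = n / 2) (hk : k < 2 ^ n)
    (dp : Nat → Int) (hQ : pvQ nums n T dp (k + 1)) :
    pvQ nums n T (pvAltProcess nums n dp k) k := by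
  obtain ⟨hQ1, hQ2⟩ := hQ
  have hdpk : dp k = 0 := hQ2 k (by omega)
  constructor
  · intro s hks hs hev
    by_cases hsk : s = k
    · subst hsk
      simp only [pvAltProcess, bitCount_eq_pvPc, if_pos rfl]
      rw [hdpk]
      have hple : pvPc s / 2 ≤ T := by
        have := pvPc_le n s hs
        omega
      show pvPairLoop nums n (pvPc s / 2) s dp (List.range n) 0 = pvFv nums n T s
      by_cases hppT : pvPc s / 2 = T
      · rw [pairLoop_nop nums n (pvPc s / 2) s dp (List.range n) 0 ?_]
        · simp [pvFv, hppT, pvG]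
        · intro i j hi hij hj
          rintro ⟨hbi, hbj⟩
          have h2 := pvPc_set_two s i j hbi hbj (Nat.ne_of_lt hij)
          have hlt := new_lt_two_pow s i j n hs (List.mem_range.mp hi) hj
          have := pvPc_le n _ hlt
          omega
      · have hpplt : pvPc s / 2 < T := by omega
        rw [pairLoop_range_drop]
        rw [pairLoop_congr nums n (pvPc s / 2) s dp
          (fun s' => pvG nums n T (T - pvPc s / 2) s' (pvPc s / 2 + 1)) (List.range (n - 1)) 0 ?_]
        · have hfv : pvFv nums n T s = pvG nums n T (T - pvPc s / 2 + 1) s (pvPc s / 2) := by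
            unfold pvFv
            congr 1
            omega
          rw [hfv]
          simp [pvG, hppT]
        · intro i j _ hij hj hbi hbj
          have h2 := pvPc_set_two s i j hbi hbj (Nat.ne_of_lt hij)
          have hlt := new_lt_two_pow s i j n hs (by omega) hj
          have hgt := lt_new s i j hbi
          have hdp := hQ1 (s ||| 1 <<< i ||| 1 <<< j) (by omega) hlt (by omega)
          rw [hdp]
          unfold pvFv
          have e1 : pvPc (s ||| 1 <<< i ||| 1 <<< j) / 2 = pvPc s / 2 + 1 := by omega
          rw [e1]
          congr 1
          omega
    · simp only [pvAltProcess, if_neg hsk]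
      exact hQ1 s (by omega) hs hev
  · intro s hsk
    have hne : s ≠ k := by omega
    simp only [pvAltProcess, if_neg hne]
    exact hQ2 s (by omega)

lemma foldB (nums : List Int) (n T : Nat) (hT : T = n / 2) :
    ∀ (m : Nat), m ≤ 2 ^ n → ∀ dp, pvQ nums n T dp m →
      pvQ nums n T (((List.range m).reverse).foldl (pvAltProcess nums n) dp) 0 := by
  intro m
  induction m with
  | zero => intro _ dp hQ; simpa using hQ
  | succ m ih =>
    intro hle dp hQ
    have hrev : (List.range (m + 1)).reverse = m :: (List.range m).reverse := by
      simp [List.range_succ]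
    rw [hrev, List.foldl_cons]
    exact ih (by omega) _ (stepB nums n T m hT (by omega) dp hQ)

-- ===== VERDICT (by name: the statement is the Claim_ definition above) =====
theorem max_score2_spec : Claim_equal_max_score2 := by
  intro nums _
  unfold Spec_max_score2
  show max_score2 nums = max_score2_alt nums
  have hA : max_score2 nums
      = pvG nums nums.length (nums.length / 2) (nums.length / 2 + 1) 0 0 := by
    have h := (bt_correct nums nums.length (nums.length / 2) (nums.length / 2 + 1) 0 0
      (fun _ => -1) (Nat.zero_le _) (by omega) (by simp [pvPc_zero]) (fun s => Or.inl rfl)).1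
    simpa [max_score2] using h
  have hFv0 : pvFv nums nums.length (nums.length / 2) 0
      = pvG nums nums.length (nums.length / 2) (nums.length / 2 + 1) 0 0 := by
    simp [pvFv, pvPc_zero]
  have hB : max_score2_alt nums = pvFv nums nums.length (nums.length / 2) 0 := by
    have hQ0 : pvQ nums nums.length (nums.length / 2) (fun _ => 0) (2 ^ nums.length) :=
      ⟨fun s hge hlt _ => absurd hlt (by omega), fun _ _ => rfl⟩
    have h := (foldB nums nums.length (nums.length / 2) rfl (2 ^ nums.length) le_rfl _ hQ0).1
      0 (Nat.zero_le _) (Nat.two_pow_pos _) (by simp [pvPc_zero])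
    simpa [max_score2_alt, Nat.shiftLeft_eq] using h
  rw [hA, hB, hFv0]
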